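-- pv_equiv track=rewrite | github.com/ankitshah009/leetcode_python | graphs/1966-binary_searchable_numbers_in_an_unsorted_array.py | binarySearchableNumbers
-- ===== SOURCE A (Python) =====
-- from typing import List
--
-- def binarySearchableNumbers(nums: List[int]) -> int:
--     """
--     Use monotonic stack to track candidates.
--     """
--     n = len(nums)
--     stack = []  # Stores indices of potential candidates
--     max_so_far = float('-inf')
--
--     for i in range(n):
--         # Remove candidates that are >= current (can't be searched)
--         while stack and nums[stack[-1]] >= nums[i]:
--             stack.pop()
--
--         # Add current if > all previous
--         if nums[i] > max_so_far:
--             stack.append(i)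
--
--         max_so_far = max(max_so_far, nums[i])
--
--     return len(stack)
-- ===== SOURCE B (Python) =====
-- from typing import List
--
-- def binarySearchableNumbers(nums: List[int]) -> int:
--     """Suffix-min array + prefix-max scan."""
--     n = len(nums)
--     suffix_min = [0.0] * n
--     cur = float('inf')
--     for i in range(n - 1, -1, -1):
--         suffix_min[i] = cur
--         cur = min(cur, nums[i])
--     count = 0
--     prefix_max = float('-inf')
--     for i in range(n):
--         if nums[i] > prefix_max and nums[i] < suffix_min[i]:
--             count += 1
--         prefix_max = max(prefix_max, nums[i])
--     return count
-- ===== Notes on version B (the rewrite author's own statement) =====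
-- stated objective: alternative
-- what changed: Replaces the monotonic index stack with a precomputed suffix-min array plus a running prefix-max scan, counting elements strictly greater than everything on their left and strictly smaller than everything on their right.
import Mathlib
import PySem

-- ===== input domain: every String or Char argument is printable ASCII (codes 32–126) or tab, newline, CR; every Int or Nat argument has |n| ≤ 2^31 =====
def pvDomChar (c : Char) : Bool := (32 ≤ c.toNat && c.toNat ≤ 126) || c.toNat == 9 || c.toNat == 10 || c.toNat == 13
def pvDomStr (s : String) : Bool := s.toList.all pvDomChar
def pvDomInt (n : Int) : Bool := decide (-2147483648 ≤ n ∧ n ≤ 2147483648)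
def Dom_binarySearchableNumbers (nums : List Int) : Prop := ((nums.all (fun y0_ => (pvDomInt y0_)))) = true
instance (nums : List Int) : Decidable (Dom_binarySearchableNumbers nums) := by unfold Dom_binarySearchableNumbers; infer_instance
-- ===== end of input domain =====

-- B replaces A's monotonic index stack by a suffix-min array plus a prefix-max scan (same O(n) cost, different algorithm).

-- ===== PORT A =====
-- float('-inf') is ported as `Option Int` with `none` = -inf: it is only ever compared with
-- and maxed against ints, so this is exact.
def pvLtO : Option Int → Int → Bool
  | none, _ => true
  | some m, x => decide (m < x)

def pvMaxO : Option Int → Int → Option Int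
  | none, x => some x
  | some m, x => some (max m x)

-- nums[i]: the indices used (loop index from range(n), stack entries) are always in range,
-- so pyGetD with default 0 is exact here.
def pvVal (nums : List Int) (i : Int) : Int := PySem.List.pyGetD nums i 0

-- the `while stack and nums[stack[-1]] >= nums[i]: stack.pop()` loop; stack top at head
def pvPopA (nums : List Int) (x : Int) : List Int → List Int
  | [] => []
  | t :: s => if x ≤ pvVal nums t then pvPopA nums x s else t :: s

-- one iteration of A's for-loop: state = (stack of indices, max_so_far)
def pvStepA (nums : List Int) (st : List Int × Option Int) (i : Int) : List Int × Option Int :=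
  let x := pvVal nums i
  let s1 := pvPopA nums x st.1
  let s2 := if pvLtO st.2 x then i :: s1 else s1
  (s2, pvMaxO st.2 x)

def binarySearchableNumbers (nums : List Int) : Int :=
  let n : Int := (nums.length : Int)
  let st := (PySem.List.pyRange 0 n 1).foldl (pvStepA nums) ([], none)
  (st.1.length : Int)

-- ===== PORT B =====
-- float('inf') ported as `Option Int` with `none` = +inf (exact: only compared/min'ed with ints).
def pvGtO : Option Int → Int → Bool
  | none, _ => true
  | some m, x => decide (x < m)

def pvMinO : Option Int → Int → Option Int
  | none, x => some x
  | some m, x => some (min m x)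

-- Source B's right-to-left scan building (min of l, suffix_min list for l)
def pvSuffMins : List Int → Option Int × List (Option Int)
  | [] => (none, [])
  | x :: xs =>
    let p := pvSuffMins xs
    (pvMinO p.1 x, p.1 :: p.2)

def binarySearchableNumbers_alt (nums : List Int) : Int :=
  let sm := (pvSuffMins nums).2
  let st := (nums.zip sm).foldl
    (fun (st : Option Int × Int) p =>
      (pvMaxO st.1 p.1, if pvLtO st.1 p.1 && pvGtO p.2 p.1 then st.2 + 1 else st.2))
    (none, 0)
  st.2

-- ===== PRECONDITION & SPEC =====
def Spec_binarySearchableNumbers (nums : List Int) (out : Int) : Prop := out = binarySearchableNumbers_alt nums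
instance (nums : List Int) (out : Int) : Decidable (Spec_binarySearchableNumbers nums out) := by unfold Spec_binarySearchableNumbers; infer_instance

-- ===== CLAIM (what is proved, stated in full; the proofs are below) =====
def Claim_equal_binarySearchableNumbers : Prop := ∀ (nums : List Int), Dom_binarySearchableNumbers nums → Spec_binarySearchableNumbers nums (binarySearchableNumbers nums)

-- ===== LEMMAS AND PROOFS =====

-- reference count: number of searchable elements of l, given prefix max pm
def pvCnt : Option Int → List Int → Nat
  | _, [] => 0
  | pm, x :: xs =>
    (if pvLtO pm x && xs.all (fun y => decide (x < y)) then 1 else 0) + pvCnt (pvMaxO pm x) xs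

lemma pvGtO_suffMins (x : Int) : ∀ xs : List Int,
    pvGtO (pvSuffMins xs).1 x = xs.all (fun y => decide (x < y)) := by
  intro xs
  induction xs with
  | nil => rfl
  | cons y ys ih =>
    simp only [pvSuffMins, List.all_cons, ← ih]
    cases h : (pvSuffMins ys).1 <;> simp [pvMinO, pvGtO, Bool.and_comm]

lemma altLoop_eq_cnt : ∀ (l : List Int) (pm : Option Int) (c : Int),
    ((l.zip (pvSuffMins l).2).foldl
      (fun (st : Option Int × Int) p =>
        (pvMaxO st.1 p.1, if pvLtO st.1 p.1 && pvGtO p.2 p.1 then st.2 + 1 else st.2))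
      (pm, c)).2 = c + (pvCnt pm l : Int) := by
  intro l
  induction l with
  | nil => simp [pvCnt]
  | cons x xs ih =>
    intro pm c
    simp only [pvSuffMins, List.zip_cons_cons, List.foldl_cons, ih, pvCnt, pvGtO_suffMins]
    split <;> push_cast <;> ring

lemma pop_eq_filter (nums : List Int) (x : Int) : ∀ s : List Int,
    List.Pairwise (fun a b => pvVal nums b < pvVal nums a) s →
    pvPopA nums x s = s.filter (fun i => decide (pvVal nums i < x)) := by
  intro s
  induction s with
  | nil => intro _; rfl
  | cons t s ih =>
    intro hp
    rw [List.pairwise_cons] at hp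
    by_cases h : x ≤ pvVal nums t
    · simp only [pvPopA, if_pos h, ih hp.2, List.filter_cons]
      have : ¬ (pvVal nums t < x) := by omega
      simp [this]
    · simp only [pvPopA, if_neg h, List.filter_cons]
      have hx : pvVal nums t < x := by omega
      have : s.filter (fun i => decide (pvVal nums i < x)) = s := by
        apply List.filter_eq_self.mpr
        intro b hb
        have := hp.1 b hb
        simp; omega
      simp [hx, this]

lemma loopA_eq (nums : List Int) : ∀ (suf pre s : List Int) (pm : Option Int),
    nums = pre ++ suf →
    List.Pairwise (fun a b => pvVal nums b < pvVal nums a) s →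
    (((PySem.List.pyRange (pre.length : Int) (nums.length : Int) 1).foldl
        (pvStepA nums) (s, pm)).1.length)
      = s.countP (fun i => suf.all (fun y => decide (pvVal nums i < y))) + pvCnt pm suf := by
  intro suf
  induction suf with
  | nil =>
    intro pre s pm hn _
    have hlen : (nums.length : Int) = (pre.length : Int) := by simp [hn]
    rw [hlen, PySem.List.pyRange_one_eq_nil (by omega)]
    simp [pvCnt, List.countP_eq_length_filter, List.filter_eq_self.mpr]
  | cons x rest ih =>
    intro pre s pm hn hp
    have hx : pvVal nums (pre.length : Int) = x := by
      simp [pvVal, PySem.List.pyGetD_natCast, hn, List.getD_eq_getElem?_getD]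
    have hlt : (pre.length : Int) < (nums.length : Int) := by
      have : nums.length = pre.length + (rest.length + 1) := by simp [hn]
      omega
    rw [PySem.List.pyRange_one_cons hlt, List.foldl_cons]
    have hstep : pvStepA nums (s, pm) (pre.length : Int)
        = ((if pvLtO pm x then (pre.length : Int) :: s.filter (fun i => decide (pvVal nums i < x))
            else s.filter (fun i => decide (pvVal nums i < x))), pvMaxO pm x) := by
      simp [pvStepA, hx, pop_eq_filter nums x s hp]
    have hfp : List.Pairwise (fun a b => pvVal nums b < pvVal nums a)
        (s.filter (fun i => decide (pvVal nums i < x))) :=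
      hp.sublist List.filter_sublist
    have hfx : ∀ i ∈ s.filter (fun i => decide (pvVal nums i < x)), pvVal nums i < x := by
      intro i hi
      have := List.of_mem_filter hi
      simpa using this
    have hpre' : nums = (pre ++ [x]) ++ rest := by simp [hn]
    have hlen' : ((pre ++ [x]).length : Int) = (pre.length : Int) + 1 := by simp
    rw [hstep]
    -- apply IH to the new state
    by_cases hpush : pvLtO pm x = true
    · have hp' : List.Pairwise (fun a b => pvVal nums b < pvVal nums a)
          ((pre.length : Int) :: s.filter (fun i => decide (pvVal nums i < x))) := by
        rw [List.pairwise_cons]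
        exact ⟨fun i hi => by rw [hx]; exact hfx i hi, hfp⟩
      have := ih (pre ++ [x]) ((pre.length : Int) :: s.filter (fun i => decide (pvVal nums i < x)))
        (pvMaxO pm x) hpre' hp'
      rw [hlen'] at this
      rw [hpush, if_pos rfl, this]
      simp only [List.countP_cons, List.countP_filter, hx, pvCnt, hpush, Bool.true_and]
      by_cases hall : rest.all (fun y => decide (x < y)) = true
      · simp [hall, Bool.and_comm]; omega
      · simp [hall, Bool.and_comm]
    · have := ih (pre ++ [x]) (s.filter (fun i => decide (pvVal nums i < x)))
        (pvMaxO pm x) hpre' hfp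
      rw [hlen'] at this
      rw [eq_false_of_ne_true hpush, if_neg (by simp), this]
      simp only [List.countP_filter, pvCnt, eq_false_of_ne_true hpush, Bool.false_and]
      simp [Bool.and_comm]

-- ===== VERDICT (by name: the statement is the Claim_ definition above) =====
theorem binarySearchableNumbers_spec : Claim_equal_binarySearchableNumbers := by
  intro nums _
  unfold Spec_binarySearchableNumbers binarySearchableNumbers binarySearchableNumbers_alt
  dsimp only []
  have hA := loopA_eq nums nums [] [] none (by simp) (by simp)
  simp only [List.length_nil, Nat.cast_zero] at hA
  rw [hA, altLoop_eq_cnt nums none 0]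
  simp
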